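-- pv_equiv track=rewrite | github.com/grasshopperTrainer/coding_practice | baekjoon/accepted/2579 계단 오르기.py | solution
-- ===== SOURCE A (Python) =====
-- def solution(N, scores):
--     # two cases
--     # 1. max of 1,2 step before from 2 step before + current
--     # 2. 2 step before of 1 step before + current
--     record = []
--
--     for i, score in enumerate(scores):
--         record.append([score, score])
--         if i-1 >= 0:
--             record[i][0] = max([record[i][0], record[i-1][1] + score])
--         if i-2 >= 0:
--             record[i][1] = max([record[i][1], max(record[i-2]) + score])
--
--     return max(record[-1])
-- ===== SOURCE B (Python) =====
-- def solution(N, scores):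
--     # Rolling three-value window of the closed recurrence
--     # f[i] = s_i + max(0, f[i-2], s_{i-1} + max(0, f[i-3])), instead of A's
--     # growing list of [consecutive, skipped] pairs.  O(1) extra space.
--     a = b = c = 0  # best totals ending on steps i-3, i-2, i-1 (0 = none yet)
--     prev = 0
--     for i, s in enumerate(scores):
--         cur = s if i == 0 else s + max(0, b, prev + max(0, a))
--         a, b, c = b, c, cur
--         prev = s
--     return c
-- ===== Notes on version B (the rewrite author's own statement) =====
-- stated objective: alternative
-- what changed: Replaces A's growing list of [consecutive, skipped] score pairs with the closed one-value recurrence f[i] = s_i + max(0, f[i-2], s_{i-1} + max(0, f[i-3])), kept in a rolling three-variable window (O(1) space, no per-step list append/indexing).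
import Mathlib
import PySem

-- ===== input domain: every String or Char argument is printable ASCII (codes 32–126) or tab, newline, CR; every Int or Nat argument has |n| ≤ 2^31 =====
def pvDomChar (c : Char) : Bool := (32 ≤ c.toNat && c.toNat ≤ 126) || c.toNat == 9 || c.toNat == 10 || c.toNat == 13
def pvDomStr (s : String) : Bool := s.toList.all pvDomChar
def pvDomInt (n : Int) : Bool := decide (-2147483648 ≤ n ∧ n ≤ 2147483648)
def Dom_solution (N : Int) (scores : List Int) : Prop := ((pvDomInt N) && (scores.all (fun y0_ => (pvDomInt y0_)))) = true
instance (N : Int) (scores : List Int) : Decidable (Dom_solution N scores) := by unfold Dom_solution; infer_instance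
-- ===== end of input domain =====

-- B replaces A's growing list of [consecutive, skipped] pairs with a rolling
-- three-variable window of the closed recurrence for the best total ending on
-- step i (same O(N) time, O(1) space); return values proved equal on nonempty scores.

-- ===== PORT A =====
-- one loop iteration: append [score, score], then the two guarded in-place maxes
def stepA (rec : List (Int × Int)) (i : Nat) (score : Int) : List (Int × Int) :=
  let r : Int × Int := (score, score)
  let r := if 1 ≤ i then (max r.1 ((rec.getD (i - 1) (0, 0)).2 + score), r.2) else r
  let r := if 2 ≤ i then
      (r.1, max r.2 (max (rec.getD (i - 2) (0, 0)).1 (rec.getD (i - 2) (0, 0)).2 + score))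
    else r
  rec ++ [r]

def loopA : List (Int × Int) → Nat → List Int → List (Int × Int)
  | rec, _, [] => rec
  | rec, i, s :: rest => loopA (stepA rec i s) (i + 1) rest

def solution (N : Int) (scores : List Int) : Int :=
  let record := loopA [] 0 scores
  -- record[-1]: raises IndexError on empty record (excluded by Pre_solution)
  let last := record.getD (record.length - 1) (0, 0)
  max last.1 last.2

-- ===== PORT B =====
def loopB : Int → Int → Int → Int → Nat → List Int → Int
  | _, _, c, _, _, [] => c
  | a, b, c, prev, i, s :: rest =>
      let cur := if i = 0 then s else s + max 0 (max b (prev + max 0 a))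
      loopB b c cur s (i + 1) rest

def solution_alt (N : Int) (scores : List Int) : Int :=
  loopB 0 0 0 0 0 scores

-- ===== PRECONDITION & SPEC =====
-- A evaluates record[-1] on the empty record: Pre_ excludes empty scores, where A raises IndexError.
def Pre_solution (N : Int) (scores : List Int) : Prop := scores ≠ []
instance (N : Int) (scores : List Int) : Decidable (Pre_solution N scores) := by
  unfold Pre_solution; infer_instance

def pvWitness_solution : Int × List Int := (6, [10, 20, 15, 25, 10, 20])

def Spec_solution (N : Int) (scores : List Int) (out : Int) : Prop := out = solution_alt N scores
instance (N : Int) (scores : List Int) (out : Int) : Decidable (Spec_solution N scores out) := by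
  unfold Spec_solution; infer_instance

-- ===== CLAIM (what is proved, stated in full; the proofs are below) =====
def Claim_equal_solution : Prop := ∀ (N : Int) (scores : List Int), Dom_solution N scores → Pre_solution N scores → Spec_solution N scores (solution N scores)

-- ===== LEMMAS AND PROOFS =====

-- invariant tying A's record to B's rolling window after i processed scores
def InvAB (rec : List (Int × Int)) (i : Nat) (a b c prev : Int) : Prop :=
  rec.length = i ∧
  (i = 0 → b = 0 ∧ c = 0) ∧
  (i = 1 → b = 0) ∧
  (1 ≤ i → max (rec.getD (i - 1) (0, 0)).1 (rec.getD (i - 1) (0, 0)).2 = c ∧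
            (rec.getD (i - 1) (0, 0)).2 = prev + max 0 a) ∧
  (2 ≤ i → max (rec.getD (i - 2) (0, 0)).1 (rec.getD (i - 2) (0, 0)).2 = b)

lemma getD_concat_lt (l : List (Int × Int)) (x : Int × Int) (j : Nat) (h : j < l.length) :
    (l ++ [x]).getD j (0, 0) = l.getD j (0, 0) := by
  simp [List.getD_eq_getElem?_getD, List.getElem?_append_left h]

lemma getD_concat_len (l : List (Int × Int)) (x : Int × Int) :
    (l ++ [x]).getD l.length (0, 0) = x := by
  simp [List.getD_eq_getElem?_getD]

lemma step_Inv (rec : List (Int × Int)) (i : Nat) (a b c prev s : Int)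
    (h : InvAB rec i a b c prev) :
    InvAB (stepA rec i s) (i + 1) b c
      (if i = 0 then s else s + max 0 (max b (prev + max 0 a))) s := by
  obtain ⟨hlen, h0, h1, hc, hb⟩ := h
  unfold InvAB stepA
  refine ⟨by simp [hlen], by omega, ?_, ?_, ?_⟩
  · intro hi
    have : i = 0 := by omega
    exact (h0 this).2
  · intro _
    have hidx : i + 1 - 1 = rec.length := by omega
    rw [hidx]
    rcases Nat.eq_zero_or_pos i with h00 | hpos
    · subst h00
      obtain ⟨hb0, hc0⟩ := h0 rfl
      simp [hb0]
    · have h1le : 1 ≤ i := hpos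
      obtain ⟨hcmax, hc2⟩ := hc h1le
      by_cases h2 : 2 ≤ i
      · have hbmax := hb h2
        simp only [if_pos h1le, if_pos h2, getD_concat_len]
        constructor
        · simp only [if_neg (by omega : ¬ i = 0)]
          rw [hc2, hbmax]
          omega
        · rw [hbmax]; omega
      · have hieq : i = 1 := by omega
        subst hieq
        have hb0 := h1 rfl
        simp only [if_pos (le_refl 1), if_neg h2, getD_concat_len]
        constructor
        · simp only [if_neg (by omega : ¬ (1:Nat) = 0)]
          rw [hc2, hb0]
          omega
        · rw [hb0]; omega
  · intro _
    have hidx : i + 1 - 2 = i - 1 := by omega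
    rw [hidx]
    have hlt : i - 1 < rec.length := by omega
    rw [getD_concat_lt _ _ _ hlt]
    exact (hc (by omega)).1

lemma loop_eq : ∀ (rest : List Int) (rec : List (Int × Int)) (i : Nat) (a b c prev : Int),
    InvAB rec i a b c prev → 1 ≤ i + rest.length →
    (max ((loopA rec i rest).getD ((loopA rec i rest).length - 1) (0, 0)).1
         ((loopA rec i rest).getD ((loopA rec i rest).length - 1) (0, 0)).2)
      = loopB a b c prev i rest := by
  intro rest
  induction rest with
  | nil =>
      intro rec i a b c prev h hle
      simp only [loopA, loopB]
      have hi : 1 ≤ i := by simpa using hle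
      have := (h.2.2.2.1 hi).1
      rw [h.1] at *
      exact this
  | cons s rest ih =>
      intro rec i a b c prev h _
      simp only [loopA, loopB]
      exact ih _ _ _ _ _ _ (step_Inv rec i a b c prev s h) (by omega)

lemma inv_init : InvAB [] 0 0 0 0 0 := by
  unfold InvAB
  refine ⟨rfl, fun _ => ⟨rfl, rfl⟩, by omega, by omega, by omega⟩

-- ===== VERDICT (by name: the statement is the Claim_ definition above) =====
theorem solution_spec : Claim_equal_solution := by
  intro N scores _ hpre
  unfold Spec_solution solution solution_alt
  have hlen : 1 ≤ (0:Nat) + scores.length := by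
    cases scores with
    | nil => exact absurd rfl hpre
    | cons x xs => simp
  exact loop_eq scores [] 0 0 0 0 0 inv_init hlen
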